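-- pv_equiv track=rewrite | github.com/nvk681/LeetCode | rt.py | findMaxPoint
-- ===== SOURCE A (Python) =====
-- def findMaxPoint(N, K, A):
--     dp = [[0] * (K + 1) for _ in range(N + 1)]
--
--     for i in range(1, N + 1):
--         for k in range(1, K + 1):
--             dp[i][k] = max(
--                 dp[i - 1][k - 1] + A[i - 1] * (K - k + 1),
--                 dp[i - 1][k]
--             )
--
--     return max(dp[N])
-- ===== SOURCE B (Python) =====
-- def findMaxPoint(N, K, A):
--     # Top-down memoized recursion instead of A's bottom-up table fill:
--     # solve(i, k) = best weighted sum using the first i elements with k column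
--     # budget; the answer is the max of solve(N, k) over k in 0..K (k = 0 keeps
--     # the pick-nothing value 0 available for all-negative A).
--     memo = {}
--
--     def solve(i, k):
--         if i <= 0 or k <= 0:
--             return 0
--         if (i, k) not in memo:
--             memo[(i, k)] = max(solve(i - 1, k - 1) + A[i - 1] * (K - k + 1),
--                                solve(i - 1, k))
--         return memo[(i, k)]
--
--     return max(solve(N, k) for k in range(K + 1))
-- ===== Notes on version B (the rewrite author's own statement) =====
-- stated objective: alternative
-- what changed: Replaces A's bottom-up fill of the whole (N+1)x(K+1) table with nested loops by demand-driven top-down recursion solve(i,k) memoized in a dict, taking the answer as max over solve(N,k) for k in 0..K; no table is ever materialised.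
import Mathlib
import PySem

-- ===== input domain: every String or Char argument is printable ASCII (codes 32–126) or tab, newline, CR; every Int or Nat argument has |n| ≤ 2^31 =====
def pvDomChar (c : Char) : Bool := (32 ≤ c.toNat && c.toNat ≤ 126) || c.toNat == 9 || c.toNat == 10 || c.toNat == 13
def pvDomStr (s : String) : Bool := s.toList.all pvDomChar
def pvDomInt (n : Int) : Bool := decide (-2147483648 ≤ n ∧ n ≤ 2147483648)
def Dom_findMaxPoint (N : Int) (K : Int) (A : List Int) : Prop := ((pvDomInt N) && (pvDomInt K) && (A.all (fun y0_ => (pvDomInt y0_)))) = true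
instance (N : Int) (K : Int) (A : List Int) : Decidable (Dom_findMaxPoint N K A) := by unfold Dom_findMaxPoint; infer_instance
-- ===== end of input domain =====

-- B replaces A's bottom-up fill of the (N+1)×(K+1) table by demand-driven top-down
-- memoized recursion solve(i,k) with a dict, answer = max over k of solve(N,k)
-- (objective: alternative decomposition, no table materialised).
-- ===== PORT A =====
-- inner-loop body: dp[i][k] = max(dp[i-1][k-1] + A[i-1]*(K-k+1), dp[i-1][k])
def stepA (K : Int) (A : List Int) (i : Int) (dp : List (List Int)) (k : Int) : List (List Int) :=
  let v := max (PySem.List.pyGetD (PySem.List.pyGetD dp (i-1) []) (k-1) 0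
                 + PySem.List.pyGetD A (i-1) 0 * (K - k + 1))
               (PySem.List.pyGetD (PySem.List.pyGetD dp (i-1) []) k 0)
  PySem.List.pySetD dp i (PySem.List.pySetD (PySem.List.pyGetD dp i []) k v)

-- body of the outer loop over i: the inner loop 'for k in range(1, K+1)'
def rowLoopA (K : Int) (A : List Int) (dp : List (List Int)) (i : Int) : List (List Int) :=
  (PySem.List.pyRange 1 (K+1) 1).foldl (stepA K A i) dp

def findMaxPoint (N : Int) (K : Int) (A : List Int) : Int :=
  let dp := (PySem.List.pyRange 0 (N+1) 1).map (fun _ => List.replicate (K+1).toNat (0:Int))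
  let dp := (PySem.List.pyRange 1 (N+1) 1).foldl (rowLoopA K A) dp
  (PySem.List.max? (PySem.List.pyGetD dp N []) (fun y => y)).getD 0

-- ===== PORT B =====
-- def solve(i, k): the memoized recursion, threading the memo dict through;
-- returns (value, updated memo).  'if (i,k) not in memo: memo[(i,k)] = …; return memo[(i,k)]'
def solveB (K : Int) (A : List Int) (i k : Int) (memo : PySem.Dict (Int × Int) Int) :
    Int × PySem.Dict (Int × Int) Int :=
  if _h : i ≤ 0 ∨ k ≤ 0 then (0, memo)
  else
    match memo.get? (i, k) with
    | some v => (v, memo)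
    | none =>
        let r1 := solveB K A (i-1) (k-1) memo
        let r2 := solveB K A (i-1) k r1.2
        let v := max (r1.1 + PySem.List.pyGetD A (i-1) 0 * (K - k + 1)) r2.1
        (v, r2.2.insert (i, k) v)
termination_by i.toNat
decreasing_by all_goals omega

-- max(solve(N, k) for k in range(K+1)): collect the generator's values, memo threaded
def genStepB (N K : Int) (A : List Int)
    (st : List Int × PySem.Dict (Int × Int) Int) (k : Int) :
    List Int × PySem.Dict (Int × Int) Int :=
  let r := solveB K A N k st.2
  (st.1 ++ [r.1], r.2)

def findMaxPoint_alt (N : Int) (K : Int) (A : List Int) : Int :=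
  let res := (PySem.List.pyRange 0 (K+1) 1).foldl (genStepB N K A) ([], PySem.Dict.empty)
  (PySem.List.max? res.1 (fun y => y)).getD 0

-- ===== PRECONDITION & SPEC =====
-- A raises (IndexError/ValueError) exactly when N < 0, K < 0, or K ≥ 1 with N > len(A).
def Pre_findMaxPoint (N : Int) (K : Int) (A : List Int) : Prop :=
  0 ≤ N ∧ 0 ≤ K ∧ (K = 0 ∨ N ≤ (A.length : Int))
instance (N : Int) (K : Int) (A : List Int) : Decidable (Pre_findMaxPoint N K A) := by
  unfold Pre_findMaxPoint; infer_instance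

def pvWitness_findMaxPoint : Int × Int × List Int := (2, 2, [3, -1])

def Spec_findMaxPoint (N : Int) (K : Int) (A : List Int) (out : Int) : Prop := out = findMaxPoint_alt N K A
instance (N : Int) (K : Int) (A : List Int) (out : Int) : Decidable (Spec_findMaxPoint N K A out) := by unfold Spec_findMaxPoint; infer_instance

-- ===== CLAIM (what is proved, stated in full; the proofs are below) =====
def Claim_equal_findMaxPoint : Prop := ∀ (N : Int) (K : Int) (A : List Int), Dom_findMaxPoint N K A → Pre_findMaxPoint N K A → Spec_findMaxPoint N K A (findMaxPoint N K A)

-- ===== LEMMAS AND PROOFS =====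

-- the DP value: Fdp i k = dp[i][k]
def Fdp (K : Int) (A : List Int) : Nat → Nat → Int
  | _, 0 => 0
  | 0, _+1 => 0
  | i+1, k+1 =>
      max (Fdp K A i k + A.getD i 0 * (K - ((k:Int)+1) + 1)) (Fdp K A i (k+1))

@[simp] lemma Fdp_zero_right (K : Int) (A : List Int) (i : Nat) : Fdp K A i 0 = 0 := by
  cases i <;> rfl

@[simp] lemma Fdp_zero_left (K : Int) (A : List Int) (k : Nat) : Fdp K A 0 k = 0 := by
  cases k <;> rfl

-- A's table after the first i outer iterations
def tbl (K : Int) (A : List Int) (Kn n i : Nat) : List (List Int) :=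
  (List.range (n+1)).map (fun r => (List.range (Kn+1)).map
    (fun j => if r ≤ i then Fdp K A r j else 0))

-- A's table mid-row: rows < i done, row i filled through column kk
def tpart (K : Int) (A : List Int) (Kn n i kk : Nat) : List (List Int) :=
  (List.range (n+1)).map (fun r => (List.range (Kn+1)).map
    (fun j => if r < i then Fdp K A r j else if r = i ∧ j ≤ kk then Fdp K A r j else 0))

lemma tbl_eq_tpart_zero (A : List Int) (kK n ii : Nat) :
    tbl (kK:Int) A kK n ii = tpart (kK:Int) A kK n (ii+1) 0 := by
  unfold tbl tpart
  apply List.ext_getElem (by simp)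
  intro r h1 h2
  simp only [List.getElem_map, List.getElem_range]
  apply List.ext_getElem (by simp)
  intro j g1 g2
  simp only [List.getElem_map, List.getElem_range]
  by_cases hr : r ≤ ii
  · rw [if_pos hr, if_pos (by omega)]
  · rw [if_neg hr, if_neg (by omega)]
    by_cases hj : r = ii+1 ∧ j ≤ 0
    · rw [if_pos hj]
      have : j = 0 := by omega
      subst this
      simp
    · rw [if_neg hj]

lemma tpart_last (A : List Int) (kK n ii : Nat) :
    tpart (kK:Int) A kK n (ii+1) kK = tbl (kK:Int) A kK n (ii+1) := by
  unfold tbl tpart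
  apply List.ext_getElem (by simp)
  intro r h1 h2
  simp only [List.getElem_map, List.getElem_range]
  apply List.ext_getElem (by simp)
  intro j g1 g2
  simp only [List.getElem_map, List.getElem_range]
  by_cases hr : r < ii+1
  · rw [if_pos hr, if_pos (by omega)]
  · rw [if_neg hr]
    by_cases he : r = ii+1
    · rw [if_pos ⟨he, by simp at g1; omega⟩, if_pos (by omega), he]
    · rw [if_neg (by tauto), if_neg (by omega)]

lemma stepA_part (A : List Int) (kK n ii kk : Nat) (hii : ii < n) (hkk : kk < kK) :
    stepA (kK:Int) A ((ii:Int)+1) (tpart (kK:Int) A kK n (ii+1) kk) ((kk:Int)+1)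
      = tpart (kK:Int) A kK n (ii+1) (kk+1) := by
  unfold stepA
  have c0 : ((ii:Int)+1-1) = ((ii:Nat):Int) := by ring
  have ck : ((kk:Int)+1-1) = ((kk:Nat):Int) := by ring
  have c1 : ((ii:Int)+1) = (((ii+1:Nat)):Int) := by push_cast; ring
  have c2 : ((kk:Int)+1) = (((kk+1:Nat)):Int) := by push_cast; ring
  rw [c0, ck, c1, c2]
  simp only [PySem.List.pyGetD_natCast, PySem.List.pySetD_natCast]
  have hrow : (tpart (kK:Int) A kK n (ii+1) kk).getD ii []
      = (List.range (kK+1)).map (fun j => Fdp (kK:Int) A ii j) := by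
    unfold tpart
    rw [List.getD_eq_getElem _ _ (by simp; omega)]
    simp only [List.getElem_map, List.getElem_range]
    apply List.map_congr_left
    intro j _
    rw [if_pos (by omega)]
  have hread1 : ((tpart (kK:Int) A kK n (ii+1) kk).getD ii []).getD kk 0
      = Fdp (kK:Int) A ii kk := by
    rw [hrow, List.getD_eq_getElem _ _ (by simp; omega)]
    simp
  have hread2 : ((tpart (kK:Int) A kK n (ii+1) kk).getD ii []).getD (kk+1) 0
      = Fdp (kK:Int) A ii (kk+1) := by
    rw [hrow, List.getD_eq_getElem _ _ (by simp; omega)]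
    simp
  rw [hread1, hread2]
  have hv : max (Fdp (kK:Int) A ii kk + A.getD ii 0 * ((kK:Int) - ((kk+1:Nat):Int) + 1))
        (Fdp (kK:Int) A ii (kk+1)) = Fdp (kK:Int) A (ii+1) (kk+1) := by
    rw [show (((kk+1:Nat)):Int) = ((kk:Int)+1) by push_cast; ring]
    rfl
  rw [hv]
  have hrowi : (tpart (kK:Int) A kK n (ii+1) kk).getD (ii+1) []
      = (List.range (kK+1)).map
          (fun j => if j ≤ kk then Fdp (kK:Int) A (ii+1) j else 0) := by
    unfold tpart
    rw [List.getD_eq_getElem _ _ (by simp; omega)]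
    simp only [List.getElem_map, List.getElem_range]
    apply List.map_congr_left
    intro j _
    by_cases hj : j ≤ kk <;> simp [hj]
  rw [hrowi]
  unfold tpart
  apply List.ext_getElem (by simp)
  intro r h1 h2
  simp only [List.getElem_set, List.getElem_map, List.getElem_range]
  by_cases hr : ii+1 = r
  · rw [if_pos hr]
    subst hr
    apply List.ext_getElem (by simp)
    intro j g1 g2
    simp only [List.getElem_set, List.getElem_map, List.getElem_range]
    by_cases hj : kk+1 = j
    · subst hj
      simp
    · by_cases hj2 : j ≤ kk
      · have h4 : j ≤ kk+1 := by omega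
        simp [hj, hj2, h4]
      · have h4 : ¬(j ≤ kk+1) := by omega
        simp [hj, hj2, h4]
  · rw [if_neg hr]
    apply List.map_congr_left
    intro j _
    have hr' : ¬(r = ii+1) := fun h => hr h.symm
    by_cases h3 : r < ii+1 <;> simp [h3, hr']

lemma innerA (A : List Int) (kK n ii : Nat) (hii : ii < n) :
    ∀ kk ≤ kK,
      (PySem.List.pyRange 1 ((kk:Int)+1) 1).foldl (stepA (kK:Int) A ((ii:Int)+1))
          (tbl (kK:Int) A kK n ii)
        = tpart (kK:Int) A kK n (ii+1) kk := by
  intro kk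
  induction kk with
  | zero =>
      intro _
      rw [PySem.List.pyRange_one_eq_nil (by omega)]
      simpa using tbl_eq_tpart_zero A kK n ii
  | succ kk ih =>
      intro hkk
      have hsplit : PySem.List.pyRange 1 (((kk+1:Nat):Int)+1) 1
          = PySem.List.pyRange 1 ((kk:Int)+1) 1 ++ [(kk:Int)+1] := by
        have : (((kk+1:Nat):Int)+1) = ((kk:Int)+1)+1 := by push_cast; ring
        rw [this, PySem.List.pyRange_one_succ_right (by omega)]
      rw [hsplit, List.foldl_append, ih (by omega)]
      simp only [List.foldl_cons, List.foldl_nil]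
      exact stepA_part A kK n ii kk hii (by omega)

lemma outerA (A : List Int) (kK n : Nat) :
    ∀ m ≤ n,
      (PySem.List.pyRange 1 ((m:Int)+1) 1).foldl (rowLoopA (kK:Int) A)
          (tbl (kK:Int) A kK n 0)
        = tbl (kK:Int) A kK n m := by
  intro m
  induction m with
  | zero =>
      intro _
      rw [PySem.List.pyRange_one_eq_nil (by omega)]
      rfl
  | succ m ih =>
      intro hm
      have hsplit : PySem.List.pyRange 1 (((m+1:Nat):Int)+1) 1
          = PySem.List.pyRange 1 ((m:Int)+1) 1 ++ [(m:Int)+1] := by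
        have : (((m+1:Nat):Int)+1) = ((m:Int)+1)+1 := by push_cast; ring
        rw [this, PySem.List.pyRange_one_succ_right (by omega)]
      rw [hsplit, List.foldl_append, ih (by omega)]
      simp only [List.foldl_cons, List.foldl_nil]
      unfold rowLoopA
      rw [innerA A kK n m (by omega) kK (le_refl kK)]
      exact tpart_last A kK n m

lemma portA_eval (A : List Int) (n kK : Nat) :
    findMaxPoint (n:Int) (kK:Int) A
      = (List.range kK).foldl (fun b j => max b (Fdp (kK:Int) A n (j+1))) 0 := by
  rw [show findMaxPoint (n:Int) (kK:Int) A
      = (PySem.List.max? (PySem.List.pyGetD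
          ((PySem.List.pyRange 1 ((n:Int)+1) 1).foldl (rowLoopA (kK:Int) A)
            ((PySem.List.pyRange 0 ((n:Int)+1) 1).map
              (fun _ => List.replicate ((kK:Int)+1).toNat (0:Int)))) (n:Int) [])
          (fun y => y)).getD 0 from rfl]
  have hinit : (PySem.List.pyRange 0 ((n:Int)+1) 1).map
      (fun _ => List.replicate ((kK:Int)+1).toNat (0:Int)) = tbl (kK:Int) A kK n 0 := by
    have ht : ((kK:Int)+1).toNat = kK+1 := by omega
    rw [ht]
    unfold tbl
    apply List.ext_getElem (by simp [PySem.List.length_pyRange_one]; try omega)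
    intro r h1 h2
    simp only [List.getElem_map, List.getElem_range]
    apply List.ext_getElem (by simp)
    intro j g1 g2
    simp only [List.getElem_replicate, List.getElem_map, List.getElem_range]
    by_cases hr : r ≤ 0
    · have : r = 0 := by omega
      subst this
      rw [if_pos (le_refl 0)]
      simp
    · rw [if_neg hr]
  rw [hinit, outerA A kK n n (le_refl n)]
  have hrow : PySem.List.pyGetD (tbl (kK:Int) A kK n n) (n:Int) []
      = (List.range (kK+1)).map (fun j => Fdp (kK:Int) A n j) := by
    rw [PySem.List.pyGetD_natCast]
    unfold tbl
    rw [List.getD_eq_getElem _ _ (by simp)]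
    simp
  rw [hrow, List.range_succ_eq_map, List.map_cons, List.map_map]
  rw [PySem.List.max?_id_cons]
  simp only [Option.getD_some]
  rw [List.foldl_map]
  simp [Function.comp]

-- the recursion's value, Int-indexed, without the memo (proof-side model of solve)
def FI (K : Int) (A : List Int) (i k : Int) : Int :=
  if i ≤ 0 ∨ k ≤ 0 then 0
  else max (FI K A (i-1) (k-1) + PySem.List.pyGetD A (i-1) 0 * (K - k + 1))
           (FI K A (i-1) k)
termination_by i.toNat
decreasing_by all_goals omega

-- memo invariant: every stored entry is the recursion's value at its key
def InvB (K : Int) (A : List Int) (memo : PySem.Dict (Int × Int) Int) : Prop :=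
  ∀ p v, memo.get? p = some v → v = FI K A p.1 p.2

lemma invB_empty (K : Int) (A : List Int) : InvB K A PySem.Dict.empty := by
  intro p v h
  simp [PySem.Dict.get?_empty] at h

lemma solveB_correct (K : Int) (A : List Int) :
    ∀ (n : Nat) (i k : Int), i.toNat ≤ n → ∀ memo, InvB K A memo →
      (solveB K A i k memo).1 = FI K A i k ∧ InvB K A (solveB K A i k memo).2 := by
  intro n
  induction n with
  | zero =>
      intro i k hi memo hm
      have h0 : i ≤ 0 := by omega
      rw [solveB, FI]
      rw [dif_pos (Or.inl h0), if_pos (Or.inl h0)]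
      exact ⟨rfl, hm⟩
  | succ n ih =>
      intro i k hi memo hm
      by_cases h : i ≤ 0 ∨ k ≤ 0
      · rw [solveB, FI, dif_pos h, if_pos h]
        exact ⟨rfl, hm⟩
      · rw [solveB, dif_neg h]
        cases hg : memo.get? (i, k) with
        | some v =>
            simp only []
            exact ⟨hm (i, k) v hg, hm⟩
        | none =>
            simp only []
            have hi1 : (i-1).toNat ≤ n := by omega
            obtain ⟨e1, m1⟩ := ih (i-1) (k-1) hi1 memo hm
            obtain ⟨e2, m2⟩ := ih (i-1) k hi1 _ m1
            refine ⟨?_, ?_⟩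
            · rw [e1, e2]
              conv_rhs => rw [FI]
              rw [if_neg h]
            · intro p v hp
              rw [PySem.Dict.get?_insert] at hp
              split at hp
              · rename_i hpe
                subst hpe
                cases hp
                show _ = FI K A i k
                rw [e1, e2]
                conv_rhs => rw [FI]
                rw [if_neg h]
              · exact m2 p v hp
-- NOTE: 'simp only []' above just beta-reduces the match arms.

lemma FI_eq_Fdp (K : Int) (A : List Int) :
    ∀ (n k : Nat), FI K A (n:Int) (k:Int) = Fdp K A n k := by
  intro n
  induction n with
  | zero =>
      intro k
      rw [FI, if_pos (Or.inl (by omega))]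
      simp
  | succ n ih =>
      intro k
      cases k with
      | zero =>
          rw [FI, if_pos (Or.inr (by omega))]
          simp
      | succ k =>
          rw [FI, if_neg (by push_cast; omega)]
          have c1 : ((n+1:Nat):Int) - 1 = (n:Int) := by push_cast; ring
          have c2 : ((k+1:Nat):Int) - 1 = (k:Int) := by push_cast; ring
          rw [c1, c2, ih k, ih (k+1), PySem.List.pyGetD_natCast]
          show max (Fdp K A n k + A.getD n 0 * (K - ((k+1:Nat):Int) + 1)) (Fdp K A n (k+1))
              = Fdp K A (n+1) (k+1)
          rw [show (((k+1:Nat)):Int) = ((k:Int)+1) by push_cast; ring]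
          rfl

lemma genLoopB (N K : Int) (A : List Int) :
    ∀ (m : Nat) (vs : List Int) (memo : PySem.Dict (Int × Int) Int), InvB K A memo →
      ((PySem.List.pyRange 0 (m:Int) 1).foldl (genStepB N K A) (vs, memo)).1
          = vs ++ (List.range m).map (fun k : Nat => FI K A N (k:Int))
      ∧ InvB K A ((PySem.List.pyRange 0 (m:Int) 1).foldl (genStepB N K A) (vs, memo)).2 := by
  intro m
  induction m with
  | zero =>
      intro vs memo hm
      rw [PySem.List.pyRange_one_eq_nil (by omega)]
      simpa using hm
  | succ m ih =>
      intro vs memo hm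
      have hsplit : PySem.List.pyRange 0 ((m+1:Nat):Int) 1
          = PySem.List.pyRange 0 (m:Int) 1 ++ [(m:Int)] := by
        rw [show ((m+1:Nat):Int) = (m:Int)+1 by push_cast; ring,
          PySem.List.pyRange_one_succ_right (by omega)]
      obtain ⟨hfst, hinv⟩ := ih vs memo hm
      rw [hsplit, List.foldl_append]
      simp only [List.foldl_cons, List.foldl_nil]
      set st := (PySem.List.pyRange 0 (m:Int) 1).foldl (genStepB N K A) (vs, memo) with hst
      obtain ⟨hv, hminv⟩ := solveB_correct K A N.toNat N (m:Int) (le_refl _) st.2 hinv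
      have hred1 : (genStepB N K A st (m:Int)).1
          = st.1 ++ [(solveB K A N (m:Int) st.2).1] := rfl
      have hred2 : (genStepB N K A st (m:Int)).2
          = (solveB K A N (m:Int) st.2).2 := rfl
      constructor
      · rw [hred1, hv, hfst, List.range_succ, List.map_append, List.append_assoc]
        rfl
      · rw [hred2]
        exact hminv

lemma portB_eval (A : List Int) (n kK : Nat) :
    findMaxPoint_alt (n:Int) (kK:Int) A
      = (List.range kK).foldl (fun b j => max b (Fdp (kK:Int) A n (j+1))) 0 := by
  rw [show findMaxPoint_alt (n:Int) (kK:Int) A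
      = (PySem.List.max?
          (((PySem.List.pyRange 0 ((kK:Int)+1) 1).foldl (genStepB (n:Int) (kK:Int) A)
            ([], PySem.Dict.empty)).1) (fun y => y)).getD 0 from rfl]
  have hc : ((kK:Int)+1) = ((kK+1:Nat):Int) := by push_cast; ring
  rw [hc]
  obtain ⟨hfst, -⟩ := genLoopB (n:Int) (kK:Int) A (kK+1) [] PySem.Dict.empty (invB_empty _ _)
  rw [hfst, List.nil_append]
  have hmap : (List.range (kK+1)).map (fun k : Nat => FI (kK:Int) A (n:Int) (k:Int))
      = (List.range (kK+1)).map (fun k => Fdp (kK:Int) A n k) := by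
    apply List.map_congr_left
    intro k _
    exact FI_eq_Fdp (kK:Int) A n k
  rw [hmap, List.range_succ_eq_map, List.map_cons, List.map_map]
  rw [PySem.List.max?_id_cons]
  simp only [Option.getD_some]
  rw [List.foldl_map]
  simp [Function.comp]

-- ===== VERDICT (by name: the statement is the Claim_ definition above) =====
theorem findMaxPoint_spec : Claim_equal_findMaxPoint := by
  intro N K A _ hpre
  obtain ⟨hN, hK, -⟩ := hpre
  unfold Spec_findMaxPoint
  obtain ⟨n, rfl⟩ : ∃ n : Nat, N = (n:Int) := ⟨N.toNat, (Int.toNat_of_nonneg hN).symm⟩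
  obtain ⟨kK, rfl⟩ : ∃ m : Nat, K = (m:Int) := ⟨K.toNat, (Int.toNat_of_nonneg hK).symm⟩
  rw [portA_eval, portB_eval]
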